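-- pv_equiv track=rewrite | github.com/miliar/Code_Jam_Webscraper | solutions_python/Problem_180/1309.py | gold_at_position
-- ===== SOURCE A (Python) =====
-- def gold_at_position(K, C, initial_pos, test_pos):
-- 	gold_pos = initial_pos
-- 	for i in range(C):
-- 		group_length = K**(C-1-i)
-- 		group_pos = test_pos // group_length
-- 		test_pos -= group_pos*group_length
-- 		if group_pos == gold_pos:
-- 			return True
-- 	return False
-- ===== SOURCE B (Python) =====
-- def gold_at_position(K, C, initial_pos, test_pos):
--     if C <= 0:
--         return False
--     digits = []
--     t = test_pos
--     for _ in range(C - 1):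
--         t, d = divmod(t, K)
--         digits.append(d)
--     digits.append(t)
--     return initial_pos in digits
-- ===== Notes on version B (the rewrite author's own statement) =====
-- stated objective: faster
-- what changed: B builds the list of base-K digits once, least-significant-first by repeated divmod on a shrinking quotient, then answers by a membership test, instead of A's loop that recomputes the big power K**(C-1-i) and floor-divides by it at every iteration.
-- outside the precondition, e.g. on gold_at_position(0, 2, 0, 0): A raises ZeroDivisionError, B raises ZeroDivisionError; on gold_at_position(-6, 3, -6, -1): A returns True, B returns False
import Mathlib
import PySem

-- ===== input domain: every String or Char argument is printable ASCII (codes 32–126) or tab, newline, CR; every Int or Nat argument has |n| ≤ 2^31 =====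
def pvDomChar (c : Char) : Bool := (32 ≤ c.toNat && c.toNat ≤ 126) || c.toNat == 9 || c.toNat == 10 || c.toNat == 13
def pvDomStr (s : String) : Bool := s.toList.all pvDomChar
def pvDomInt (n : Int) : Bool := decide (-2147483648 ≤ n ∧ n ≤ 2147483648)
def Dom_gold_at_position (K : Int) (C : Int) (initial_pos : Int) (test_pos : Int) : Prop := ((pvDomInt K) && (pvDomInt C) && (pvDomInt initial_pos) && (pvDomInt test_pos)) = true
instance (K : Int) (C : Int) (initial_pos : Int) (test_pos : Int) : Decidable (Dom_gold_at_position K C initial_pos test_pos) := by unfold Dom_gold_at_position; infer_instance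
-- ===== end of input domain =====

-- B builds the list of base-K digits once (least-significant-first, by repeated divmod)
-- and answers by a membership test, instead of recomputing the power K**(C-1-i) and
-- floor-dividing by it each round (objective: faster).


-- ===== PORT A =====
-- Loop `for i in range(C)`: when `fuel = C - i` iterations remain, the exponent C-1-i is fuel-1.
def goldALoop (K gold_pos : Int) : Nat → Int → Bool
  | 0, _ => false
  | Nat.succ f, test_pos =>
      let group_length : Int := K ^ f
      let group_pos := PySem.Int.floordiv test_pos group_length
      let test_pos' := test_pos - group_pos * group_length
      if group_pos == gold_pos then true else goldALoop K gold_pos f test_pos'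

def gold_at_position (K : Int) (C : Int) (initial_pos : Int) (test_pos : Int) : Bool :=
  goldALoop K initial_pos C.toNat test_pos

-- ===== PORT B =====
-- The C-1 divmod digits, least-significant first, with the final quotient appended last.
def goldDigits (K : Int) : Nat → Int → List Int
  | 0, t => [t]
  | Nat.succ n, t => PySem.Int.mod t K :: goldDigits K n (PySem.Int.floordiv t K)

def gold_at_position_alt (K : Int) (C : Int) (initial_pos : Int) (test_pos : Int) : Bool :=
  if C ≤ 0 then false
  else (goldDigits K (C - 1).toNat test_pos).contains initial_pos

-- ===== PRECONDITION & SPEC =====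
-- Pre_ excludes K ≤ 0 with C ≥ 2: there K = 0 makes A raise ZeroDivisionError, and for a
-- negative base K the digit decomposition is unspecified — A's most-significant-first
-- floor-division digits and B's least-significant-first divmod digits are both accidental
-- conventions no caller would specify.  (C ≤ 1 performs no division by K, so any K is admitted.)
def Pre_gold_at_position (K : Int) (C : Int) (initial_pos : Int) (test_pos : Int) : Prop :=
  1 ≤ K ∨ C ≤ 1
instance (K : Int) (C : Int) (initial_pos : Int) (test_pos : Int) : Decidable (Pre_gold_at_position K C initial_pos test_pos) := by unfold Pre_gold_at_position; infer_instance

def pvWitness_gold_at_position : Int × Int × Int × Int := (3, 4, 2, 77)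

def Spec_gold_at_position (K : Int) (C : Int) (initial_pos : Int) (test_pos : Int) (out : Bool) : Prop := out = gold_at_position_alt K C initial_pos test_pos
instance (K : Int) (C : Int) (initial_pos : Int) (test_pos : Int) (out : Bool) : Decidable (Spec_gold_at_position K C initial_pos test_pos out) := by unfold Spec_gold_at_position; infer_instance

-- ===== CLAIM (what is proved, stated in full; the proofs are below) =====
def Claim_equal_gold_at_position : Prop := ∀ (K : Int) (C : Int) (initial_pos : Int) (test_pos : Int), Dom_gold_at_position K C initial_pos test_pos → Pre_gold_at_position K C initial_pos test_pos → Spec_gold_at_position K C initial_pos test_pos (gold_at_position K C initial_pos test_pos)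

-- ===== LEMMAS AND PROOFS =====

-- Proof-side helper: B's digit-membership answer as a fused early-return loop.
def goldBLoop (K initial_pos : Int) : Nat → Int → Bool
  | 0, test_pos => test_pos == initial_pos
  | Nat.succ f, test_pos =>
      let q := PySem.Int.floordiv test_pos K
      let d := PySem.Int.mod test_pos K
      if d == initial_pos then true else goldBLoop K initial_pos f q

-- Int BEq is symmetric.
theorem intBeqComm (t g : Int) : (g == t) = (t == g) := by
  by_cases h : t = g
  · subst h; rfl
  · have h2 : ¬ g = t := fun e => h e.symm
    simp [h, h2]

-- Membership in the digit list is the fused loop.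
theorem contains_goldDigits (K g : Int) : ∀ (n : Nat) (t : Int),
    (goldDigits K n t).contains g = goldBLoop K g n t := by
  intro n
  induction n with
  | zero =>
      intro t
      show ([t].contains g) = (t == g)
      simp only [List.contains_cons, List.contains_nil, Bool.or_false]
      exact intBeqComm t g
  | succ n ih =>
      intro t
      show ((PySem.Int.mod t K :: goldDigits K n (PySem.Int.floordiv t K)).contains g)
        = (if (PySem.Int.mod t K == g) = true then true
           else goldBLoop K g n (PySem.Int.floordiv t K))
      rw [List.contains_cons, intBeqComm, ← ih]
      cases h : (PySem.Int.mod t K == g) <;> simp [h]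

-- (iii) for 0 < K:  (t % K^(n+2)) / K = (t / K) % K^(n+1)   (all Euclidean, = Python's on positive divisors)
theorem emod_pow_ediv (K t : Int) (hK : 0 < K) (n : Nat) :
    t % K ^ (n + 2) / K = t / K % K ^ (n + 1) := by
  have hKn : (0:Int) < K ^ (n + 1) := pow_pos hK _
  have hsplit : K ^ (n + 2) = K * K ^ (n + 1) := by ring
  have h1 : t % K ^ (n + 2) = t - K ^ (n + 2) * (t / K ^ (n + 2)) := Int.emod_def t _
  have h2 : t / K % K ^ (n + 1) = t / K - K ^ (n + 1) * (t / K / K ^ (n + 1)) :=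
    Int.emod_def _ _
  have h3 : t / K / K ^ (n + 1) = t / K ^ (n + 2) := by
    rw [Int.ediv_ediv_of_nonneg (le_of_lt hK), ← hsplit]
  have h4 : t % K ^ (n + 2) / K = t / K - K ^ (n + 1) * (t / K ^ (n + 2)) := by
    rw [h1, hsplit]
    have : t - K * K ^ (n + 1) * (t / (K * K ^ (n + 1)))
        = t + K * (-(K ^ (n + 1) * (t / (K * K ^ (n + 1))))) := by ring
    rw [this, Int.add_mul_ediv_left _ _ (ne_of_gt hK)]
    ring
  rw [h4, h2, h3]

-- Pull the most-significant digit out of the fused loop (0 < K):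
theorem goldBLoop_msd (K g : Int) (hK : 0 < K) : ∀ (n : Nat) (t : Int),
    goldBLoop K g (n + 1) t
      = ((PySem.Int.floordiv t (K ^ (n + 1)) == g)
          || goldBLoop K g n (PySem.Int.mod t (K ^ (n + 1)))) := by
  intro n
  induction n with
  | zero =>
      intro t
      simp only [goldBLoop, pow_one]
      cases h1 : (PySem.Int.mod t K == g) <;> cases h2 : (PySem.Int.floordiv t K == g) <;>
        simp [goldBLoop, h1, h2]
  | succ n ih =>
      intro t
      have hKn1 : (0:Int) < K ^ (n + 1) := pow_pos hK _
      have hKn2 : (0:Int) < K ^ (n + 2) := pow_pos hK _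
      have hsplit : K ^ (n + 2) = K * K ^ (n + 1) := by ring
      have lhs : goldBLoop K g (n + 2) t
          = ((PySem.Int.mod t K == g)
              || ((PySem.Int.floordiv (PySem.Int.floordiv t K) (K ^ (n + 1)) == g)
                  || goldBLoop K g n (PySem.Int.mod (PySem.Int.floordiv t K) (K ^ (n + 1))))) := by
        show (if (PySem.Int.mod t K == g) = true then true
              else goldBLoop K g (n + 1) (PySem.Int.floordiv t K)) = _
        rw [ih (PySem.Int.floordiv t K)]
        cases h : (PySem.Int.mod t K == g) <;> simp [h]
      have rhs : ((PySem.Int.floordiv t (K ^ (n + 2)) == g)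
              || goldBLoop K g (n + 1) (PySem.Int.mod t (K ^ (n + 2))))
          = ((PySem.Int.floordiv t (K ^ (n + 2)) == g)
              || ((PySem.Int.mod (PySem.Int.mod t (K ^ (n + 2))) K == g)
                  || goldBLoop K g n (PySem.Int.floordiv (PySem.Int.mod t (K ^ (n + 2))) K))) := by
        have : goldBLoop K g (n + 1) (PySem.Int.mod t (K ^ (n + 2)))
            = (if (PySem.Int.mod (PySem.Int.mod t (K ^ (n + 2))) K == g) = true then true
               else goldBLoop K g n (PySem.Int.floordiv (PySem.Int.mod t (K ^ (n + 2))) K)) := rfl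
        rw [this]
        cases h : (PySem.Int.mod (PySem.Int.mod t (K ^ (n + 2))) K == g) <;> simp [h]
      rw [lhs, rhs]
      rw [PySem.Int.floordiv_eq_ediv_of_pos hK, PySem.Int.mod_eq_emod_of_pos hK,
          PySem.Int.floordiv_eq_ediv_of_pos hKn1, PySem.Int.mod_eq_emod_of_pos hKn1,
          PySem.Int.floordiv_eq_ediv_of_pos hKn2, PySem.Int.mod_eq_emod_of_pos hKn2,
          PySem.Int.floordiv_eq_ediv_of_pos hK, PySem.Int.mod_eq_emod_of_pos hK]
      have e1 : t / K / K ^ (n + 1) = t / K ^ (n + 2) := by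
        rw [Int.ediv_ediv_of_nonneg (le_of_lt hK), ← hsplit]
      have e2 : t % K ^ (n + 2) % K = t % K :=
        Int.emod_emod_of_dvd t (Dvd.intro (K ^ (n + 1)) (by rw [← hsplit]))
      have e3 : t % K ^ (n + 2) / K = t / K % K ^ (n + 1) := emod_pow_ediv K t hK n
      rw [e1, e2, e3]
      cases (t % K == g) <;> cases (t / K ^ (n + 2) == g) <;>
        cases goldBLoop K g n (t / K % K ^ (n + 1)) <;> simp

-- Main: A's MS-first loop with fuel n+1 equals the fused LS-first loop with fuel n (0 < K).
theorem goldALoop_eq_goldBLoop (K g : Int) (hK : 0 < K) : ∀ (n : Nat) (t : Int),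
    goldALoop K g (n + 1) t = goldBLoop K g n t := by
  intro n
  induction n with
  | zero =>
      intro t
      simp only [goldALoop, goldBLoop, pow_zero]
      have h1 : PySem.Int.floordiv t 1 = t := by
        rw [PySem.Int.floordiv_eq_ediv_of_pos (by norm_num)]; exact Int.ediv_one t
      rw [h1]
      cases h : (t == g) <;> simp [h]
  | succ n ih =>
      intro t
      have hKn1 : (0:Int) < K ^ (n + 1) := pow_pos hK _
      have hmod : t - PySem.Int.floordiv t (K ^ (n + 1)) * K ^ (n + 1)
          = PySem.Int.mod t (K ^ (n + 1)) := by
        have := PySem.Int.floordiv_mul_add_mod t (K ^ (n + 1))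
        linarith
      have lhs : goldALoop K g (n + 2) t
          = (if (PySem.Int.floordiv t (K ^ (n + 1)) == g) = true then true
             else goldALoop K g (n + 1)
               (t - PySem.Int.floordiv t (K ^ (n + 1)) * K ^ (n + 1))) := rfl
      rw [lhs, hmod, goldBLoop_msd K g hK n t]
      cases h : (PySem.Int.floordiv t (K ^ (n + 1)) == g) <;> simp [h, ih]

-- ===== VERDICT (by name: the statement is the Claim_ definition above) =====
theorem gold_at_position_spec : Claim_equal_gold_at_position := by
  intro K C g t _ hPre
  show gold_at_position K C g t = gold_at_position_alt K C g t
  unfold gold_at_position gold_at_position_alt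
  by_cases hC : C ≤ 0
  · have : C.toNat = 0 := Int.toNat_of_nonpos hC
    simp [this, goldALoop, hC]
  · push_neg at hC
    have hCn : C.toNat = (C - 1).toNat + 1 := by omega
    rw [hCn, if_neg (by omega), contains_goldDigits]
    by_cases hC1 : C = 1
    · subst hC1
      simp only [show ((1:Int) - 1).toNat = 0 from rfl, goldALoop, goldBLoop, pow_zero]
      have h1 : PySem.Int.floordiv t 1 = t := by
        rw [PySem.Int.floordiv_eq_ediv_of_pos (by norm_num)]; exact Int.ediv_one t
      rw [h1]
      cases h : (t == g) <;> simp [h]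
    · have hK : 0 < K := by
        rcases hPre with h | h
        · omega
        · omega
      exact goldALoop_eq_goldBLoop K g hK (C - 1).toNat t
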